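-- pv_equiv track=rewrite | github.com/denisrmp/hacker-rank | hacker-rank/implementation/bomber_man.py | explode_field
-- ===== SOURCE A (Python) =====
-- def explode_field(r, c, grid):
--     new_grid = [list('O' * c) for _ in range(r)]
--     for irow in range(r):
--         for icol in range(c):
--             if grid[irow][icol] == 'O':
--                 new_grid[irow][icol] = '.'
--                 if icol - 1 >= 0:
--                     new_grid[irow][icol - 1] = '.'
--                 if icol + 1 < c:
--                     new_grid[irow][icol + 1] = '.'
--                 if irow - 1 >= 0:
--                     new_grid[irow - 1][icol] = '.'
--                 if irow + 1 < r:
--                     new_grid[irow + 1][icol] = '.'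
--     return [''.join(row) for row in new_grid]
-- ===== SOURCE B (Python) =====
-- def explode_field(r, c, grid):
--     def bomb(i, j):
--         return 0 <= i < r and 0 <= j < c and grid[i][j] == 'O'
--     return [''.join('.' if (bomb(i, j) or bomb(i - 1, j) or bomb(i + 1, j)
--                             or bomb(i, j - 1) or bomb(i, j + 1)) else 'O'
--                     for j in range(c))
--             for i in range(r)]
-- ===== Notes on version B (the rewrite author's own statement) =====
-- stated objective: alternative
-- what changed: A scatters: it pre-fills an r x c grid with 'O' and, for every bomb, mutates that cell and its in-bounds neighbours to '.'; B gathers: it builds each output cell directly as '.' iff the cell or one of its four in-bounds neighbours holds 'O' in the input, with no mutable grid.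
import Mathlib
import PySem

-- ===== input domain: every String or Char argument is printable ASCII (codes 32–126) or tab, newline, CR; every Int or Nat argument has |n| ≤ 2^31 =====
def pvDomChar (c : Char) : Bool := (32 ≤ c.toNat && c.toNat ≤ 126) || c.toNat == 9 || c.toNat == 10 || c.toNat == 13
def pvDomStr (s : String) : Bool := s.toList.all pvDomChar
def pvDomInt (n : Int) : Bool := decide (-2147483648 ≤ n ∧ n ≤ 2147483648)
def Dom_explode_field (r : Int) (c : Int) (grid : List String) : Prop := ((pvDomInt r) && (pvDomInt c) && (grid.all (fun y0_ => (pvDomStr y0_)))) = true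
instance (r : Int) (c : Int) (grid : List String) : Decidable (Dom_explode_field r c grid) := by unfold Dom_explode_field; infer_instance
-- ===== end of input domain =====

-- B replaces A's scatter (pre-fill an r×c grid with 'O', then each bomb writes '.' into itself
-- and its in-bounds neighbours) by a gather (each output cell is computed directly from the
-- input grid: '.' iff the cell or an in-bounds neighbour holds 'O'); objective: alternative.

-- grid[i][j] == 'O'  (total read via pyGetD; Pre_ guarantees every access Python makes is in range)
def cellO (grid : List String) (i j : Int) : Bool :=
  PySem.List.pyGetD ((PySem.List.pyGetD grid i "").toList) j ' ' == 'O'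

-- ===== PORT A =====
-- new_grid[i][j] = '.'
def set2 (g : List (List Char)) (i j : Int) : List (List Char) :=
  PySem.List.pySetD g i (PySem.List.pySetD (PySem.List.pyGetD g i []) j '.')

def explode_field (r : Int) (c : Int) (grid : List String) : List String :=
  let init : List (List Char) :=
    (PySem.List.pyRange 0 r 1).map (fun _ => List.replicate c.toNat 'O')
  let fin : List (List Char) :=
    (PySem.List.pyRange 0 r 1).foldl (fun g irow =>
      (PySem.List.pyRange 0 c 1).foldl (fun g icol =>
        if cellO grid irow icol then
          let g1 := set2 g irow icol
          let g2 := if icol - 1 ≥ 0 then set2 g1 irow (icol - 1) else g1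
          let g3 := if icol + 1 < c then set2 g2 irow (icol + 1) else g2
          let g4 := if irow - 1 ≥ 0 then set2 g3 (irow - 1) icol else g3
          let g5 := if irow + 1 < r then set2 g4 (irow + 1) icol else g4
          g5
        else g) g) init
  fin.map (fun row => String.ofList row)

-- ===== PORT B =====
def bombAt (r c : Int) (grid : List String) (i j : Int) : Bool :=
  decide (0 ≤ i) && decide (i < r) && decide (0 ≤ j) && decide (j < c) && cellO grid i j

def explode_field_alt (r : Int) (c : Int) (grid : List String) : List String :=
  (PySem.List.pyRange 0 r 1).map (fun i =>
    String.ofList ((PySem.List.pyRange 0 c 1).map (fun j =>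
      if bombAt r c grid i j || bombAt r c grid (i - 1) j || bombAt r c grid (i + 1) j
         || bombAt r c grid i (j - 1) || bombAt r c grid i (j + 1) then '.' else 'O')))

-- ===== PRECONDITION & SPEC =====
-- Pre_ excludes exactly the inputs on which Python A raises an IndexError: when both loops
-- run (0 < r and 0 < c), grid must have at least r rows, each of the first r rows with at
-- least c characters.
def Pre_explode_field (r : Int) (c : Int) (grid : List String) : Prop :=
  0 < r → 0 < c →
    r ≤ (grid.length : Int) ∧ ∀ s ∈ grid.take r.toNat, c ≤ (s.toList.length : Int)
instance (r : Int) (c : Int) (grid : List String) : Decidable (Pre_explode_field r c grid) := by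
  unfold Pre_explode_field; infer_instance
def pvWitness_explode_field : Int × Int × List String := (2, 2, ["O.", ".."])

def Spec_explode_field (r : Int) (c : Int) (grid : List String) (out : List String) : Prop := out = explode_field_alt r c grid
instance (r : Int) (c : Int) (grid : List String) (out : List String) : Decidable (Spec_explode_field r c grid out) := by unfold Spec_explode_field; infer_instance

-- ===== CLAIM (what is proved, stated in full; the proofs are below) =====
def Claim_equal_explode_field : Prop := ∀ (r : Int) (c : Int) (grid : List String), Dom_explode_field r c grid → Pre_explode_field r c grid → Spec_explode_field r c grid (explode_field r c grid)

-- ===== LEMMAS AND PROOFS =====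

theorem pyGetD_nonneg {α : Type} (xs : List α) (i : Int) (d : α) (h : 0 ≤ i) :
    PySem.List.pyGetD xs i d = xs.getD i.toNat d := by
  have e : i = ((i.toNat : Nat) : Int) := by omega
  rw [e, PySem.List.pyGetD_natCast]; simp only [Int.toNat_natCast]

def get2 (g : List (List Char)) (i j : Int) : Char :=
  PySem.List.pyGetD (PySem.List.pyGetD g i []) j ' '

def Dims (rn cn : Nat) (g : List (List Char)) : Prop :=
  g.length = rn ∧ ∀ row ∈ g, row.length = cn

theorem dims_set2 {rn cn : Nat} {g : List (List Char)} (h : Dims rn cn g) (a b : Int)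
    (ha : 0 ≤ a) (har : a < (rn : Int)) (hb : 0 ≤ b) : Dims rn cn (set2 g a b) := by
  obtain ⟨h1, h2⟩ := h
  have han : a.toNat < g.length := by omega
  constructor
  · rw [set2, PySem.List.pySetD_of_nonneg _ _ ha, List.length_set, h1]
  · intro row hrow
    rw [set2, PySem.List.pySetD_of_nonneg _ _ ha] at hrow
    rcases List.mem_or_eq_of_mem_set hrow with h' | h'
    · exact h2 _ h'
    · subst h'
      rw [PySem.List.pySetD_of_nonneg _ _ hb, List.length_set,
          pyGetD_nonneg _ _ _ ha, List.getD_eq_getElem _ _ han]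
      exact h2 _ (List.getElem_mem han)

theorem get2_set2 {rn cn : Nat} {g : List (List Char)} (h : Dims rn cn g)
    {a b i j : Int} (ha0 : 0 ≤ a) (har : a < (rn : Int)) (hb0 : 0 ≤ b) (hbc : b < (cn : Int))
    (hi : 0 ≤ i) (hj : 0 ≤ j) :
    get2 (set2 g a b) i j = if i = a ∧ j = b then '.' else get2 g i j := by
  obtain ⟨h1, h2⟩ := h
  have han : a.toNat < g.length := by omega
  have hrowlen : (g[a.toNat]).length = cn := h2 _ (List.getElem_mem han)
  have hbn : b.toNat < (g[a.toNat]).length := by omega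
  rw [set2, PySem.List.pySetD_of_nonneg _ _ ha0, PySem.List.pySetD_of_nonneg _ _ hb0,
      pyGetD_nonneg _ _ _ ha0, List.getD_eq_getElem _ _ han]
  rw [get2, get2, pyGetD_nonneg _ _ _ hi, pyGetD_nonneg _ _ _ hi]
  by_cases hin : i.toNat < g.length
  · rw [List.getD_eq_getElem _ _ (by simpa using hin), List.getD_eq_getElem _ _ hin,
        List.getElem_set]
    by_cases hia : a.toNat = i.toNat
    · have hia' : i = a := by omega
      rw [if_pos hia]
      subst hia'
      rw [pyGetD_nonneg _ _ _ hj, pyGetD_nonneg _ _ _ hj]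
      by_cases hjb : j.toNat = b.toNat
      · have hjb' : j = b := by omega
        rw [hjb', if_pos ⟨rfl, rfl⟩, List.getD_eq_getElem _ _ (by simpa using hbn)]
        simp
      · have hne : ¬(i = i ∧ j = b) := by omega
        rw [if_neg hne]
        by_cases hjn : j.toNat < (g[i.toNat]).length
        · rw [List.getD_eq_getElem _ _ (by simpa using hjn), List.getD_eq_getElem _ _ hjn,
              List.getElem_set, if_neg (fun hh => hjb hh.symm)]
        · rw [List.getD_eq_default _ _ (by simp; omega), List.getD_eq_default _ _ (by omega)]
    · have : ¬(i = a ∧ j = b) := by omega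
      rw [if_neg hia, if_neg this]
  · rw [List.getD_eq_default _ _ (by simp; omega), List.getD_eq_default _ _ (by omega)]
    have : ¬(i = a ∧ j = b) := by omega
    rw [if_neg this]

def tgtB (r c : Int) (a b i j : Int) : Bool :=
  (decide (i = a) && decide (j = b)) ||
  (decide (i = a) && decide (j = b - 1) && decide (1 ≤ b)) ||
  (decide (i = a) && decide (j = b + 1) && decide (b + 1 < c)) ||
  (decide (i = a - 1) && decide (j = b) && decide (1 ≤ a)) ||
  (decide (i = a + 1) && decide (j = b) && decide (a + 1 < r))

def step (r c : Int) (grid : List String) (irow : Int) (g : List (List Char)) (icol : Int) :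
    List (List Char) :=
  if cellO grid irow icol then
    (fun g4 => if irow + 1 < r then set2 g4 (irow + 1) icol else g4)
    ((fun g3 => if irow - 1 ≥ 0 then set2 g3 (irow - 1) icol else g3)
    ((fun g2 => if icol + 1 < c then set2 g2 irow (icol + 1) else g2)
    ((fun g1 => if icol - 1 ≥ 0 then set2 g1 irow (icol - 1) else g1)
    (set2 g irow icol))))
  else g

theorem dims_cset {rn cn : Nat} {g : List (List Char)} (P : Prop) [Decidable P]
    (h : Dims rn cn g) {a b : Int}
    (hP : P → 0 ≤ a ∧ a < (rn : Int) ∧ 0 ≤ b ∧ b < (cn : Int)) :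
    Dims rn cn (if P then set2 g a b else g) := by
  split_ifs with hp
  · exact dims_set2 h a b (hP hp).1 (hP hp).2.1 (hP hp).2.2.1
  · exact h

theorem get2_cset {rn cn : Nat} {g : List (List Char)} (P : Prop) [Decidable P]
    (h : Dims rn cn g) {a b i j : Int}
    (hP : P → 0 ≤ a ∧ a < (rn : Int) ∧ 0 ≤ b ∧ b < (cn : Int))
    (hi : 0 ≤ i) (hj : 0 ≤ j) :
    get2 (if P then set2 g a b else g) i j
      = if P ∧ i = a ∧ j = b then '.' else get2 g i j := by
  split_ifs with hp hq hq
  · exact (get2_set2 h (hP hp).1 (hP hp).2.1 (hP hp).2.2.1 (hP hp).2.2.2 hi hj).trans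
      (if_pos hq.2)
  · exact (get2_set2 h (hP hp).1 (hP hp).2.1 (hP hp).2.2.1 (hP hp).2.2.2 hi hj).trans
      (if_neg (fun hh => hq ⟨hp, hh⟩))
  · exact absurd hq.1 hp
  · rfl

theorem dims_step {r c : Int} {grid : List String} {I J : Int} {g : List (List Char)}
    (hd : Dims r.toNat c.toNat g) (hI0 : 0 ≤ I) (hIr : I < r) (hJ0 : 0 ≤ J) (hJc : J < c) :
    Dims r.toNat c.toNat (step r c grid I g J) := by
  unfold step
  by_cases hO : cellO grid I J = true
  · rw [if_pos hO]
    beta_reduce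
    exact dims_cset (I + 1 < r) (dims_cset (I - 1 ≥ 0) (dims_cset (J + 1 < c)
      (dims_cset (J - 1 ≥ 0) (dims_set2 hd I J hI0 (by omega) hJ0)
        (a := I) (b := J - 1) (fun h => by omega))
      (a := I) (b := J + 1) (fun h => by omega))
      (a := I - 1) (b := J) (fun h => by omega))
      (a := I + 1) (b := J) (fun h => by omega)
  · rw [if_neg hO]
    exact hd

theorem get2_step {r c : Int} {grid : List String} {I J i j : Int} {g : List (List Char)}
    (hd : Dims r.toNat c.toNat g) (hI0 : 0 ≤ I) (hIr : I < r) (hJ0 : 0 ≤ J) (hJc : J < c)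
    (hi : 0 ≤ i) (hj : 0 ≤ j) :
    get2 (step r c grid I g J) i j
      = if (cellO grid I J && tgtB r c I J i j) = true then '.' else get2 g i j := by
  by_cases hO : cellO grid I J = true
  · have d1 : Dims r.toNat c.toNat (set2 g I J) := dims_set2 hd I J hI0 (by omega) hJ0
    have d2 : Dims r.toNat c.toNat (if J - 1 ≥ 0 then set2 (set2 g I J) I (J - 1) else set2 g I J) :=
      dims_cset _ d1 (fun h => by omega)
    have d3 := dims_cset (J + 1 < c) d2 (a := I) (b := J + 1) (fun h => by omega)
    have d4 := dims_cset (I - 1 ≥ 0) d3 (a := I - 1) (b := J) (fun h => by omega)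
    unfold step
    rw [if_pos hO]
    beta_reduce
    rw [get2_cset (I + 1 < r) d4 (fun h => by omega) hi hj,
        get2_cset (I - 1 ≥ 0) d3 (fun h => by omega) hi hj,
        get2_cset (J + 1 < c) d2 (fun h => by omega) hi hj,
        get2_cset (J - 1 ≥ 0) d1 (fun h => by omega) hi hj,
        get2_set2 hd hI0 (by omega) hJ0 (by omega) hi hj]
    rw [hO, Bool.true_and]
    by_cases hT : tgtB r c I J i j = true
    · rw [if_pos hT]
      split_ifs <;> try rfl
      exfalso; simp [tgtB] at hT; omega
    · rw [if_neg hT]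
      split_ifs with h1 h2 h3 h4 h5 <;> try rfl
      all_goals (exfalso; apply hT; simp [tgtB]; omega)
  · unfold step
    rw [if_neg hO]
    have : (cellO grid I J && tgtB r c I J i j) = false := by
      simp [Bool.eq_false_iff.mpr hO]
    rw [this]
    simp

theorem inner_fold {r c : Int} {grid : List String} {I : Int}
    (hI0 : 0 ≤ I) (hIr : I < r) :
    ∀ (n : Nat) (J : Int), (c - J).toNat = n → 0 ≤ J →
    ∀ g, Dims r.toNat c.toNat g →
      Dims r.toNat c.toNat ((PySem.List.pyRange J c 1).foldl (step r c grid I) g) ∧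
      ∀ i j, 0 ≤ i → 0 ≤ j →
        get2 ((PySem.List.pyRange J c 1).foldl (step r c grid I) g) i j
          = if (PySem.List.pyRange J c 1).any
                (fun b => cellO grid I b && tgtB r c I b i j) = true
            then '.' else get2 g i j := by
  intro n
  induction n with
  | zero =>
    intro J hn hJ0 g hd
    rw [PySem.List.pyRange_one_eq_nil (by omega)]
    exact ⟨hd, fun i j hi hj => by simp⟩
  | succ n ih =>
    intro J hn hJ0 g hd
    have hJc : J < c := by omega
    rw [PySem.List.pyRange_one_cons hJc]
    simp only [List.foldl_cons, List.any_cons]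
    have hd' := dims_step (grid := grid) hd hI0 hIr hJ0 hJc
    obtain ⟨hdf, hch⟩ := ih (J + 1) (by omega) (by omega) _ hd'
    refine ⟨hdf, fun i j hi hj => ?_⟩
    rw [hch i j hi hj, get2_step hd hI0 hIr hJ0 hJc hi hj]
    by_cases h1 : (PySem.List.pyRange (J + 1) c 1).any
        (fun b => cellO grid I b && tgtB r c I b i j) = true
    · simp [h1]
    · simp [h1]

theorem outer_fold {r c : Int} {grid : List String} :
    ∀ (n : Nat) (I : Int), (r - I).toNat = n → 0 ≤ I →
    ∀ g, Dims r.toNat c.toNat g →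
      Dims r.toNat c.toNat ((PySem.List.pyRange I r 1).foldl
        (fun g irow => (PySem.List.pyRange 0 c 1).foldl (step r c grid irow) g) g) ∧
      ∀ i j, 0 ≤ i → 0 ≤ j →
        get2 ((PySem.List.pyRange I r 1).foldl
            (fun g irow => (PySem.List.pyRange 0 c 1).foldl (step r c grid irow) g) g) i j
          = if (PySem.List.pyRange I r 1).any (fun a =>
                (PySem.List.pyRange 0 c 1).any
                  (fun b => cellO grid a b && tgtB r c a b i j)) = true
            then '.' else get2 g i j := by
  intro n
  induction n with
  | zero =>
    intro I hn hI0 g hd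
    rw [PySem.List.pyRange_one_eq_nil (a := I) (b := r) (by omega)]
    exact ⟨hd, fun i j hi hj => by simp⟩
  | succ n ih =>
    intro I hn hI0 g hd
    have hIr : I < r := by omega
    rw [PySem.List.pyRange_one_cons (a := I) (b := r) hIr]
    simp only [List.foldl_cons]
    obtain ⟨hd', hch'⟩ := inner_fold hI0 hIr (c - 0).toNat 0 rfl le_rfl g hd
    obtain ⟨hdf, hch⟩ := ih (I + 1) (by omega) (by omega) _ hd'
    refine ⟨hdf, fun i j hi hj => ?_⟩
    rw [hch i j hi hj, hch' i j hi hj, List.any_cons]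
    cases hY : ((PySem.List.pyRange 0 c 1).any fun b => cellO grid I b && tgtB r c I b i j) <;>
      cases hX : ((PySem.List.pyRange (I + 1) r 1).any fun a =>
        (PySem.List.pyRange 0 c 1).any fun b => cellO grid a b && tgtB r c a b i j) <;>
      simp

def affB (r c : Int) (grid : List String) (i j : Int) : Bool :=
  (PySem.List.pyRange 0 r 1).any (fun a =>
    (PySem.List.pyRange 0 c 1).any (fun b => cellO grid a b && tgtB r c a b i j))

def bOr (r c : Int) (grid : List String) (i j : Int) : Bool :=
  bombAt r c grid i j || bombAt r c grid (i - 1) j || bombAt r c grid (i + 1) j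
    || bombAt r c grid i (j - 1) || bombAt r c grid i (j + 1)

theorem tgtB_iff (r c a b i j : Int) :
    tgtB r c a b i j = true ↔
      ((i = a ∧ j = b) ∨ (i = a ∧ j = b - 1 ∧ 1 ≤ b) ∨ (i = a ∧ j = b + 1 ∧ b + 1 < c) ∨
       (i = a - 1 ∧ j = b ∧ 1 ≤ a) ∨ (i = a + 1 ∧ j = b ∧ a + 1 < r)) := by
  simp only [tgtB, Bool.or_eq_true, Bool.and_eq_true, decide_eq_true_eq]
  tauto

theorem aff_eq_bor {r c : Int} {grid : List String} {i j : Int}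
    (hi0 : 0 ≤ i) (hir : i < r) (hj0 : 0 ≤ j) (hjc : j < c) :
    affB r c grid i j = bOr r c grid i j := by
  rw [Bool.eq_iff_iff]
  constructor
  · intro h
    simp only [affB, List.any_eq_true, PySem.List.mem_pyRange_one, Bool.and_eq_true] at h
    obtain ⟨a, ⟨ha0, har⟩, b, ⟨hb0, hbc⟩, hcell, htgt⟩ := h
    rw [tgtB_iff] at htgt
    simp only [bOr, bombAt, Bool.or_eq_true, Bool.and_eq_true, decide_eq_true_eq]
    rcases htgt with ⟨hia, hjb⟩ | ⟨hia, hjb, hb1⟩ | ⟨hia, hjb, hb1⟩ |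
        ⟨hia, hjb, hb1⟩ | ⟨hia, hjb, hb1⟩
    · refine Or.inl (Or.inl (Or.inl (Or.inl ⟨⟨⟨⟨by omega, by omega⟩, by omega⟩, by omega⟩, ?_⟩)))
      have e1 : i = a := by omega
      have e2 : j = b := by omega
      rw [e1, e2]; exact hcell
    · refine Or.inr ⟨⟨⟨⟨by omega, by omega⟩, by omega⟩, by omega⟩, ?_⟩
      have e1 : i = a := by omega
      have e2 : j + 1 = b := by omega
      rw [e1, e2]; exact hcell
    · refine Or.inl (Or.inr ⟨⟨⟨⟨by omega, by omega⟩, by omega⟩, by omega⟩, ?_⟩)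
      have e1 : i = a := by omega
      have e2 : j - 1 = b := by omega
      rw [e1, e2]; exact hcell
    · refine Or.inl (Or.inl (Or.inr ⟨⟨⟨⟨by omega, by omega⟩, by omega⟩, by omega⟩, ?_⟩))
      have e1 : i + 1 = a := by omega
      have e2 : j = b := by omega
      rw [e1, e2]; exact hcell
    · refine Or.inl (Or.inl (Or.inl (Or.inr ⟨⟨⟨⟨by omega, by omega⟩, by omega⟩, by omega⟩, ?_⟩)))
      have e1 : i - 1 = a := by omega
      have e2 : j = b := by omega
      rw [e1, e2]; exact hcell
  · intro h
    simp only [bOr, bombAt, Bool.or_eq_true, Bool.and_eq_true, decide_eq_true_eq] at h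
    simp only [affB, List.any_eq_true, PySem.List.mem_pyRange_one, Bool.and_eq_true]
    rcases h with ((((hb | hb) | hb) | hb) | hb) <;>
      obtain ⟨⟨⟨⟨h1, h2⟩, h3⟩, h4⟩, hcell⟩ := hb
    · exact ⟨i, ⟨by omega, by omega⟩, j, ⟨by omega, by omega⟩, hcell,
        by rw [tgtB_iff]; omega⟩
    · exact ⟨i - 1, ⟨by omega, by omega⟩, j, ⟨by omega, by omega⟩, hcell,
        by rw [tgtB_iff]; omega⟩
    · exact ⟨i + 1, ⟨by omega, by omega⟩, j, ⟨by omega, by omega⟩, hcell,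
        by rw [tgtB_iff]; omega⟩
    · exact ⟨i, ⟨by omega, by omega⟩, j - 1, ⟨by omega, by omega⟩, hcell,
        by rw [tgtB_iff]; omega⟩
    · exact ⟨i, ⟨by omega, by omega⟩, j + 1, ⟨by omega, by omega⟩, hcell,
        by rw [tgtB_iff]; omega⟩

theorem dims_init (r c : Int) :
    Dims r.toNat c.toNat ((PySem.List.pyRange 0 r 1).map (fun _ => List.replicate c.toNat 'O')) := by
  constructor
  · rw [List.length_map, PySem.List.length_pyRange_one]; omega
  · intro row hrow
    obtain ⟨_, _, hrow⟩ := List.mem_map.mp hrow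
    rw [← hrow, List.length_replicate]

theorem get2_init (r c : Int) {i j : Int} (hi0 : 0 ≤ i) (hir : i < (r.toNat : Int))
    (hj0 : 0 ≤ j) (hjc : j < (c.toNat : Int)) :
    get2 ((PySem.List.pyRange 0 r 1).map (fun _ => List.replicate c.toNat 'O')) i j = 'O' := by
  have hlen : ((PySem.List.pyRange 0 r 1).map
      (fun _ : Int => List.replicate c.toNat 'O')).length = r.toNat := by
    rw [List.length_map, PySem.List.length_pyRange_one]; omega
  rw [get2, pyGetD_nonneg _ _ _ hi0, List.getD_eq_getElem _ _ (by omega), List.getElem_map,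
      pyGetD_nonneg _ _ _ hj0, List.getD_eq_getElem _ _ (by rw [List.length_replicate]; omega),
      List.getElem_replicate]

theorem ports_agree (r c : Int) (grid : List String) :
    explode_field r c grid = explode_field_alt r c grid := by
  show ((PySem.List.pyRange 0 r 1).foldl (fun g irow =>
      (PySem.List.pyRange 0 c 1).foldl (step r c grid irow) g)
      ((PySem.List.pyRange 0 r 1).map (fun _ => List.replicate c.toNat 'O'))).map
        (fun row => String.ofList row)
    = explode_field_alt r c grid
  obtain ⟨hdims, hchar⟩ := outer_fold (r - 0).toNat 0 rfl le_rfl _ (dims_init r c)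
  have hfin : ((PySem.List.pyRange 0 r 1).foldl (fun g irow =>
      (PySem.List.pyRange 0 c 1).foldl (step r c grid irow) g)
      ((PySem.List.pyRange 0 r 1).map (fun _ => List.replicate c.toNat 'O')))
      = (PySem.List.pyRange 0 r 1).map (fun a =>
          (PySem.List.pyRange 0 c 1).map (fun b =>
            if bOr r c grid a b = true then '.' else 'O')) := by
    apply List.ext_getElem
    · rw [hdims.1, List.length_map, PySem.List.length_pyRange_one]; omega
    · intro k hk hk'
      have hkr : k < r.toNat := by rw [hdims.1] at hk; omega
      rw [List.getElem_map, PySem.List.getElem_pyRange_one]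
      apply List.ext_getElem
      · rw [hdims.2 _ (List.getElem_mem hk), List.length_map, PySem.List.length_pyRange_one]
        omega
      · intro l hl hl'
        have hlc : l < c.toNat := by rw [hdims.2 _ (List.getElem_mem hk)] at hl; omega
        rw [List.getElem_map, PySem.List.getElem_pyRange_one]
        have hget : get2 ((PySem.List.pyRange 0 r 1).foldl (fun g irow =>
            (PySem.List.pyRange 0 c 1).foldl (step r c grid irow) g)
            ((PySem.List.pyRange 0 r 1).map (fun _ => List.replicate c.toNat 'O')))
            (k : Int) (l : Int) = _ := hchar (k : Int) (l : Int) (by omega) (by omega)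
        rw [get2, pyGetD_nonneg _ _ _ (by omega : (0:Int) ≤ (k : Int)),
            Int.toNat_natCast, List.getD_eq_getElem _ _ hk,
            pyGetD_nonneg _ _ _ (by omega : (0:Int) ≤ (l : Int)),
            Int.toNat_natCast, List.getD_eq_getElem _ _ hl] at hget
        rw [hget, get2_init r c (by omega) (by omega) (by omega) (by omega)]
        simp only [zero_add]
        rw [← aff_eq_bor (by omega) (by omega) (by omega) (by omega)]
        rfl
  rw [hfin, List.map_map]
  rfl

-- ===== VERDICT (by name: the statement is the Claim_ definition above) =====
theorem explode_field_spec : Claim_equal_explode_field := by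
  intro r c grid _ _
  exact ports_agree r c grid
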